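-- pv_equiv track=rewrite | github.com/NainaKalra/Python-Learning | contact_manager.py | find_duplicate_contacts
-- ===== SOURCE A (Python) =====
-- def find_duplicate_contacts(contacts_db):
--     """
--     This function finds possible duplicate contacts.
--
--     A contact is considered duplicate if:
--     - Two contacts have the same phone number
--     - OR two contacts have the same email
--     - OR two contacts have the same first+last name
--
--     """
--
--     # Where we will store the duplicates
--     duplicates = {
--         "phone_duplicates": [],
--         "email_duplicates": [],
--         "name_duplicates": []
--     }
--
--     #dictionaries that will help to check duplicates
--     phone_map = {}  # phone -> [contact_ids]
--     email_map = {}  # email -> [contact_ids]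
--     name_map = {}   # name -> [contact_ids]
--
--     # Going through each contact
--     for cid, info in contacts_db.items():
--         phone = info.get("phone")
--         email = info.get("email")
--         name = (info.get("first_name"), info.get("last_name"))
--
--     # Grouping by phone
--         if phone:
--             phone_map.setdefault(phone, []).append(cid)
--
--     # Grouping by email
--         if email:
--             email_map.setdefault(email, []).append(cid)
--
--     # Grouping by name
--         name_map.setdefault(name, []).append(cid)
--
--     # Adding only groups that have more than 1 contact
--     for ids in phone_map.values():
--         if len(ids) > 1:
--             duplicates["phone_duplicates"].append(ids)
--
--     for ids in email_map.values():
--         if len(ids) > 1: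
--             duplicates["email_duplicates"].append(ids)
--
--     for ids in name_map.values():
--         if len(ids) > 1:
--             duplicates["name_duplicates"].append(ids)
--
--     return duplicates
-- ===== SOURCE B (Python) =====
-- def find_duplicate_contacts(contacts_db):
--     """Map-free re-implementation: per criterion, scan the (key, id) pair list;
--     each first occurrence of a key triggers an inner scan that collects every id
--     with that key, and the group is emitted immediately when it has >1 member."""
--
--     def dup_groups(pairs):
--         result = []
--         seen = []
--         for key, _ in pairs:
--             if key not in seen:
--                 seen.append(key)
--                 group = [cid for k, cid in pairs if k == key]
--                 if len(group) > 1: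
--                     result.append(group)
--         return result
--
--     items = contacts_db.items()
--     phone_pairs = [(info.get("phone"), cid) for cid, info in items if info.get("phone")]
--     email_pairs = [(info.get("email"), cid) for cid, info in items if info.get("email")]
--     name_pairs = [((info.get("first_name"), info.get("last_name")), cid) for cid, info in items]
--
--     return {
--         "phone_duplicates": dup_groups(phone_pairs),
--         "email_duplicates": dup_groups(email_pairs),
--         "name_duplicates": dup_groups(name_pairs),
--     }
-- ===== Notes on version B (the rewrite author's own statement) =====
-- stated objective: alternative
-- what changed: A builds three hash maps key->id-list in one fused pass and then filters each map's value lists by length; B uses no maps at all: per criterion it scans the (key,id) pair list and, at each first occurrence of a key, runs an inner scan collecting all ids with that key, emitting the group immediately when it has more than one member.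
import Mathlib
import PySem

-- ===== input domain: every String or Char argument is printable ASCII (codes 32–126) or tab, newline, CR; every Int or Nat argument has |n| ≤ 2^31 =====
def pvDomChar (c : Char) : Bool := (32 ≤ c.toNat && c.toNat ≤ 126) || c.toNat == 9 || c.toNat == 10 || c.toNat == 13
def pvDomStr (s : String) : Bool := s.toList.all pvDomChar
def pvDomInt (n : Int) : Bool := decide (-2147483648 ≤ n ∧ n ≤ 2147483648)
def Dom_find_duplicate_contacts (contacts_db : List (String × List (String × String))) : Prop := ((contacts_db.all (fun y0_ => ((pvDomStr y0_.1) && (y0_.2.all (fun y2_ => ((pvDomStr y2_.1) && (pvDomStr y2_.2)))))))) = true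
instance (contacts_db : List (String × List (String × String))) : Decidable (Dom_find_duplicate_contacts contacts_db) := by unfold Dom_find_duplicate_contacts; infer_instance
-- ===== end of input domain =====

-- B drops A's hash maps entirely: per criterion it scans the (key,id) pair list and, at each
-- first occurrence of a key, an inner scan collects the whole group; proved equal to A.

-- ===== PORT A =====
def find_duplicate_contacts (contacts_db : List (String × List (String × String))) :
    List (String × List (List String)) :=
  let maps :=
    contacts_db.foldl
      (fun (ms : PySem.Dict String (List String) × PySem.Dict String (List String) ×
            PySem.Dict (Option String × Option String) (List String)) ci =>
        let info : PySem.Dict String String := PySem.Dict.mk ci.2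
        let phone := info.get? "phone"
        let email := info.get? "email"
        let name := (info.get? "first_name", info.get? "last_name")
        -- `if phone:` — truthy iff present and nonempty; setdefault(k, []).append(cid) = modify k [] (· ++ [cid])
        let pm := match phone with
          | some p => if p ≠ "" then ms.1.modify p [] (fun g => g ++ [ci.1]) else ms.1
          | none => ms.1
        let em := match email with
          | some e => if e ≠ "" then ms.2.1.modify e [] (fun g => g ++ [ci.1]) else ms.2.1
          | none => ms.2.1
        let nm := ms.2.2.modify name [] (fun g => g ++ [ci.1])
        (pm, em, nm))
      (PySem.Dict.empty, PySem.Dict.empty, PySem.Dict.empty)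
  let phoneDups := maps.1.values.foldl (fun acc ids => if ids.length > 1 then acc ++ [ids] else acc) []
  let emailDups := maps.2.1.values.foldl (fun acc ids => if ids.length > 1 then acc ++ [ids] else acc) []
  let nameDups := maps.2.2.values.foldl (fun acc ids => if ids.length > 1 then acc ++ [ids] else acc) []
  [("phone_duplicates", phoneDups), ("email_duplicates", emailDups), ("name_duplicates", nameDups)]

-- ===== PORT B =====
-- the loop body: state = (seen keys, result groups); `key not in seen` → ¬ contains
def dupGroupsStep {K : Type} [BEq K] (pairs : List (K × String))
    (st : List K × List (List String)) (p : K × String) : List K × List (List String) :=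
  if st.1.contains p.1 then st
  else
    let group := (pairs.filter (fun q => q.1 == p.1)).map Prod.snd
    (st.1 ++ [p.1], if group.length > 1 then st.2 ++ [group] else st.2)

def dup_groups {K : Type} [BEq K] (pairs : List (K × String)) : List (List String) :=
  (pairs.foldl (dupGroupsStep pairs) ([], [])).2

def find_duplicate_contacts_alt (contacts_db : List (String × List (String × String))) :
    List (String × List (List String)) :=
  let phone_pairs := contacts_db.filterMap (fun ci =>
    match (PySem.Dict.mk ci.2).get? "phone" with
    | some p => if p ≠ "" then some (p, ci.1) else none
    | none => none)
  let email_pairs := contacts_db.filterMap (fun ci =>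
    match (PySem.Dict.mk ci.2).get? "email" with
    | some e => if e ≠ "" then some (e, ci.1) else none
    | none => none)
  let name_pairs := contacts_db.map (fun ci =>
    (((PySem.Dict.mk ci.2).get? "first_name", (PySem.Dict.mk ci.2).get? "last_name"), ci.1))
  [("phone_duplicates", dup_groups phone_pairs),
   ("email_duplicates", dup_groups email_pairs),
   ("name_duplicates", dup_groups name_pairs)]

-- ===== PRECONDITION & SPEC =====
def Spec_find_duplicate_contacts (contacts_db : List (String × List (String × String))) (out : List (String × List (List String))) : Prop := out = find_duplicate_contacts_alt contacts_db
instance (contacts_db : List (String × List (String × String))) (out : List (String × List (List String))) : Decidable (Spec_find_duplicate_contacts contacts_db out) := by unfold Spec_find_duplicate_contacts; infer_instance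

-- ===== CLAIM (what is proved, stated in full; the proofs are below) =====
def Claim_equal_find_duplicate_contacts : Prop := ∀ (contacts_db : List (String × List (String × String))), Dom_find_duplicate_contacts contacts_db → Spec_find_duplicate_contacts contacts_db (find_duplicate_contacts contacts_db)

-- ===== LEMMAS AND PROOFS =====

-- the generic "setdefault(k, []).append(v)" grouping loop (A's maps)
def grpFold {K : Type} [BEq K] (pairs : List (K × String)) (d : PySem.Dict K (List String)) :
    PySem.Dict K (List String) :=
  pairs.foldl (fun d p => d.modify p.1 [] (fun g => g ++ [p.2])) d

-- the per-criterion (key, cid) lists B extracts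
def phonePairs (contacts_db : List (String × List (String × String))) : List (String × String) :=
  contacts_db.filterMap (fun ci =>
    match (PySem.Dict.mk ci.2).get? "phone" with
    | some p => if p ≠ "" then some (p, ci.1) else none
    | none => none)

def emailPairs (contacts_db : List (String × List (String × String))) : List (String × String) :=
  contacts_db.filterMap (fun ci =>
    match (PySem.Dict.mk ci.2).get? "email" with
    | some e => if e ≠ "" then some (e, ci.1) else none
    | none => none)

def namePairs (contacts_db : List (String × List (String × String))) :
    List ((Option String × Option String) × String) :=
  contacts_db.map (fun ci =>
    (((PySem.Dict.mk ci.2).get? "first_name", (PySem.Dict.mk ci.2).get? "last_name"), ci.1))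

-- A's fused triple-map pass equals three independent grouping folds over B's pair lists
lemma foldSplit (contacts_db : List (String × List (String × String)))
    (ms : PySem.Dict String (List String) × PySem.Dict String (List String) ×
          PySem.Dict (Option String × Option String) (List String)) :
    contacts_db.foldl
      (fun (ms : PySem.Dict String (List String) × PySem.Dict String (List String) ×
            PySem.Dict (Option String × Option String) (List String)) ci =>
        let info : PySem.Dict String String := PySem.Dict.mk ci.2
        let phone := info.get? "phone"
        let email := info.get? "email"
        let name := (info.get? "first_name", info.get? "last_name")
        let pm := match phone with
          | some p => if p ≠ "" then ms.1.modify p [] (fun g => g ++ [ci.1]) else ms.1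
          | none => ms.1
        let em := match email with
          | some e => if e ≠ "" then ms.2.1.modify e [] (fun g => g ++ [ci.1]) else ms.2.1
          | none => ms.2.1
        let nm := ms.2.2.modify name [] (fun g => g ++ [ci.1])
        (pm, em, nm)) ms
    = (grpFold (phonePairs contacts_db) ms.1, grpFold (emailPairs contacts_db) ms.2.1,
       grpFold (namePairs contacts_db) ms.2.2) := by
  induction contacts_db generalizing ms with
  | nil => simp [grpFold, phonePairs, emailPairs, namePairs]
  | cons ci db ih =>
    simp only [List.foldl_cons, ih, phonePairs, emailPairs, namePairs, List.filterMap_cons,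
      List.map_cons, grpFold]
    rcases hp : (PySem.Dict.mk ci.2).get? "phone" with _ | p <;>
      rcases he : (PySem.Dict.mk ci.2).get? "email" with _ | e <;>
      simp only [] <;> split_ifs <;> simp [List.foldl_cons]

-- the grouping fold's values: one id-list per distinct key, in first-occurrence order
lemma grpValues {K : Type} [BEq K] [LawfulBEq K] (pairs : List (K × String)) :
    (grpFold pairs PySem.Dict.empty).values
    = (PySem.Set.ofList (pairs.map Prod.fst)).map
        (fun k => (pairs.filter (fun p => p.1 == k)).map Prod.snd) := by
  have hnd : (grpFold pairs (PySem.Dict.empty : PySem.Dict K (List String))).keys.Nodup := by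
    apply PySem.Dict.nodup_keys_foldl_modify_key pairs Prod.fst [] (fun _ p => (fun g => g ++ [p.2]))
    simp [pysem]
  rw [PySem.Dict.values_eq_map_keys _ hnd []]
  have hk : (grpFold pairs (PySem.Dict.empty : PySem.Dict K (List String))).keys
      = PySem.Set.ofList (pairs.map Prod.fst) := by
    rw [grpFold, PySem.Dict.keys_foldl_modify_key pairs Prod.fst [] (fun _ p => (fun g => g ++ [p.2]))]
    simp [pysem, PySem.Set.update_nil_left]
  rw [hk]
  apply List.map_congr_left
  intro k _
  rw [grpFold, PySem.Dict.getD_foldl_modify_append]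
  simp [pysem]

-- the seen-list only grows (by appends), so the old list is a prefix
lemma prefix_foldl_add {α : Type} [BEq α] (l s : List α) :
    s <+: List.foldl PySem.Set.add s l := by
  induction l generalizing s with
  | nil => exact List.prefix_refl s
  | cons x xs ih =>
    refine List.IsPrefix.trans ?_ (ih (PySem.Set.add s x))
    simp only [PySem.Set.add]
    split
    · exact List.prefix_refl s
    · exact List.prefix_append s [x]

-- B's loop, characterised: result = groups of the NEW first-occurrence keys, filtered by size
lemma Bfold {K : Type} [BEq K] (pairs xs : List (K × String)) (s : List K) (r : List (List String)) :
    (xs.foldl (dupGroupsStep pairs) (s, r)).2 =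
    r ++ ((((xs.map Prod.fst).foldl PySem.Set.add s).drop s.length).map
        (fun k => (pairs.filter (fun q => q.1 == k)).map Prod.snd)).filter
        (fun ids => decide (ids.length > 1)) := by
  induction xs generalizing s r with
  | nil => simp
  | cons p xs ih =>
    simp only [List.foldl_cons, List.map_cons, dupGroupsStep, PySem.Set.add, PySem.Set.contains]
    by_cases hc : s.contains p.1
    · simp only [hc, if_true, ih]
    · simp only [hc, Bool.false_eq_true, if_false, ih]
      obtain ⟨t, ht⟩ := prefix_foldl_add (xs.map Prod.fst) (s ++ [p.1])
      rw [← ht]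
      have h1 : (s ++ [p.1] ++ t).drop s.length = p.1 :: t := by
        rw [List.append_assoc, List.drop_left]; rfl
      have h2 : (s ++ [p.1] ++ t).drop (s ++ [p.1]).length = t := by
        rw [List.drop_left]
      rw [h1, h2, List.map_cons, List.filter_cons]
      by_cases hg : 1 < (pairs.filter (fun q => q.1 == p.1)).length
      · simp [hg]
      · simp [hg]

lemma dup_eq {K : Type} [BEq K] [LawfulBEq K] (pairs : List (K × String)) :
    (grpFold pairs PySem.Dict.empty).values.foldl
      (fun acc ids => if ids.length > 1 then acc ++ [ids] else acc) []
    = dup_groups pairs := by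
  -- A side: post-filter of the map's values
  have hfun2 : (fun (acc : List (List String)) (ids : List String) =>
      if ids.length > 1 then acc ++ [ids] else acc)
      = (fun acc ids => if (decide (ids.length > 1)) = true then acc ++ [id ids] else acc) := by
    funext acc ids; simp
  rw [hfun2, PySem.List.foldl_append_if, List.nil_append, List.map_id, grpValues]
  -- B side: the scan loop
  rw [dup_groups, Bfold pairs pairs [] []]
  simp [PySem.Set.ofList, PySem.Set.empty]

-- ===== VERDICT (by name: the statement is the Claim_ definition above) =====
theorem find_duplicate_contacts_spec : Claim_equal_find_duplicate_contacts := by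
  intro db _
  show find_duplicate_contacts db = find_duplicate_contacts_alt db
  unfold find_duplicate_contacts find_duplicate_contacts_alt
  rw [foldSplit]
  simp only [phonePairs, emailPairs, namePairs] at *
  rw [dup_eq, dup_eq, dup_eq]
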